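-- pv_equiv track=rewrite | github.com/jcraig949jfi/Prometheus | cartography/v2/ellc_lfunction_taylor.py | compute_ellc_bulk
-- ===== SOURCE A (Python) =====
-- from collections import Counter, defaultdict
--
-- ELLS = [2, 3, 5, 7, 11, 13]  # primes for mod-ell fingerprint comparison
--
-- def compute_fingerprints(trace_cache, ell):
--     """Compute mod-ell fingerprint for each form."""
--     fps = {}
--     for label, ap in trace_cache.items():
--         fps[label] = tuple(a % ell for a in ap)
--     return fps
--
-- def compute_ellc_bulk(trace_cache):
--     """
--     Compute ell_c for all forms in bulk.
--     ell_c = smallest prime in ELLS where the form's mod-ell fingerprint is unique.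
--     Returns dict: label -> ell_c (or None if not isolated even at ell=13).
--     """
--     result = {}
--     # Pre-compute fingerprints for each ell
--     fps_by_ell = {}
--     for ell in ELLS:
--         fps = compute_fingerprints(trace_cache, ell)
--         # Count how many forms share each fingerprint
--         fp_counts = Counter(fps.values())
--         fps_by_ell[ell] = (fps, fp_counts)
--
--     for label in trace_cache:
--         ellc = None
--         for ell in ELLS:
--             fps, fp_counts = fps_by_ell[ell]
--             fp = fps[label]
--             if fp_counts[fp] == 1:  # unique at this ell
--                 ellc = ell
--                 break
--         result[label] = ellc
--
--     return result, fps_by_ell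
-- ===== SOURCE B (Python) =====
-- from collections import Counter
--
-- ELLS = [2, 3, 5, 7, 11, 13]  # primes for mod-ell fingerprint comparison
--
--
-- def compute_ellc_bulk(trace_cache):
--     # Single pass over ELLS maintaining the set of still-unresolved labels:
--     # a label is assigned the first ell at which its fingerprint is unique,
--     # and drops out of the unresolved set from then on.
--     result = {label: None for label in trace_cache}
--     unresolved = set(trace_cache)
--     fps_by_ell = {}
--     for ell in ELLS:
--         fps = {label: tuple(a % ell for a in ap)
--                for label, ap in trace_cache.items()}
--         counts = Counter(fps.values())
--         fps_by_ell[ell] = (fps, counts)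
--         for label in list(unresolved):
--             if counts[fps[label]] == 1:
--                 result[label] = ell
--                 unresolved.discard(label)
--     return result, fps_by_ell
-- ===== Notes on version B (the rewrite author's own statement) =====
-- stated objective: alternative
-- what changed: Replaces A's two-phase structure (precompute all six fingerprint tables, then for each label rescan ELLS with a break) by one merged pass over ELLS that maintains an unresolved-label set and assigns each label the first ell at which its fingerprint becomes unique.
import Mathlib
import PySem

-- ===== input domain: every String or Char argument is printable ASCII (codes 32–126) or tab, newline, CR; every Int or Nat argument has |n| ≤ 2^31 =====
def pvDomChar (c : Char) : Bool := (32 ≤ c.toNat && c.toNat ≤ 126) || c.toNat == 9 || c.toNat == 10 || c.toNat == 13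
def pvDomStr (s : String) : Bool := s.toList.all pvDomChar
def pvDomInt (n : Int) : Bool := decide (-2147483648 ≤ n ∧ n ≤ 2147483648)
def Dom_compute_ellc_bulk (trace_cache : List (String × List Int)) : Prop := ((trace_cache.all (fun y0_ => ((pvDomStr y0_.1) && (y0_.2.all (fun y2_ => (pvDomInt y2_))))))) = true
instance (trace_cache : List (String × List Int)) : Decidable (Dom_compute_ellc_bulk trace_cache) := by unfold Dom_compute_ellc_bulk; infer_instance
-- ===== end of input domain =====

-- B replaces A's two-phase structure (precompute all fingerprint tables, then rescan ELLS per
-- label with a break) by one merged pass over ELLS maintaining an unresolved-label set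
-- (objective: alternative decomposition, same cost). Equivalence is about the return value.

-- ===== PORT A =====
-- ELLS = [2, 3, 5, 7, 11, 13]
def pvELLS : List Int := [2, 3, 5, 7, 11, 13]

-- compute_fingerprints(trace_cache, ell): fps[label] = tuple(a % ell for a in ap)
def pvFingerA (d : PySem.Dict String (List Int)) (ell : Int) : PySem.Dict String (List Int) :=
  d.items.foldl (fun fps p => fps.insert p.1 (p.2.map (fun a => PySem.Int.mod a ell))) PySem.Dict.empty

-- the first loop of A: fps_by_ell[ell] = (fps, Counter(fps.values()))
def pvFpsbeA (d : PySem.Dict String (List Int)) :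
    PySem.Dict Int ((PySem.Dict String (List Int)) × (PySem.Dict (List Int) Int)) :=
  pvELLS.foldl (fun acc ell =>
    let fps := pvFingerA d ell
    acc.insert ell (fps, PySem.Dict.counter fps.values)) PySem.Dict.empty

-- A's inner 'for ell in ELLS: … break' loop; fps_by_ell[ell] and fps[label] are always
-- present (built over the same ELLS / the same keys), so the total getD is exact here.
def pvEllcA (fpsbe : PySem.Dict Int ((PySem.Dict String (List Int)) × (PySem.Dict (List Int) Int)))
    (label : String) : List Int → Option Int
  | [] => none
  | ell :: rest =>
    let pr := fpsbe.getD ell (PySem.Dict.empty, PySem.Dict.empty)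
    if pr.2.getD (pr.1.getD label []) 0 = 1 then some ell
    else pvEllcA fpsbe label rest

def compute_ellc_bulk (trace_cache : List (String × List Int)) :
    (List (String × Option Int)) × (List (Int × (List (String × List Int)) × (List (List Int × Int)))) :=
  let d := PySem.Dict.ofList trace_cache   -- the caller's dict (duplicate labels overwrite in place)
  let fps_by_ell := pvFpsbeA d
  let result := d.keys.foldl (fun res label => res.insert label (pvEllcA fps_by_ell label pvELLS))
    PySem.Dict.empty
  (result.items, fps_by_ell.items.map (fun p => (p.1, p.2.1.items, p.2.2.items)))

-- ===== PORT B =====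
-- the dict comprehension {label: tuple(a % ell for a in ap) for label, ap in trace_cache.items()}
def pvFingerB (d : PySem.Dict String (List Int)) (ell : Int) : PySem.Dict String (List Int) :=
  d.items.foldl (fun fps p => fps.insert p.1 (p.2.map (fun a => PySem.Int.mod a ell))) PySem.Dict.empty

-- one iteration of B's single 'for ell in ELLS' loop over the state
-- (result, unresolved, fps_by_ell); the inner loop runs over a snapshot of unresolved.
-- (Python iterates list(unresolved) in set order; every operation in the body is
-- key-addressed overwrite/discard, so the result does not depend on that order.)
def pvStepB (d : PySem.Dict String (List Int))
    (st : (PySem.Dict String (Option Int)) × (PySem.Set String) ×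
          (PySem.Dict Int ((PySem.Dict String (List Int)) × (PySem.Dict (List Int) Int))))
    (ell : Int) :
    (PySem.Dict String (Option Int)) × (PySem.Set String) ×
    (PySem.Dict Int ((PySem.Dict String (List Int)) × (PySem.Dict (List Int) Int))) :=
  let fps := pvFingerB d ell
  let counts := PySem.Dict.counter fps.values
  let inner := st.2.1.foldl (fun pr label =>
      if counts.getD (fps.getD label []) 0 = 1
      then (pr.1.insert label (some ell), PySem.Set.discard pr.2 label)
      else pr) (st.1, st.2.1)
  (inner.1, inner.2, st.2.2.insert ell (fps, counts))

def compute_ellc_bulk_alt (trace_cache : List (String × List Int)) :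
    (List (String × Option Int)) × (List (Int × (List (String × List Int)) × (List (List Int × Int)))) :=
  let d := PySem.Dict.ofList trace_cache
  let result0 := d.keys.foldl (fun r l => r.insert l (none : Option Int)) PySem.Dict.empty
  let st := pvELLS.foldl (pvStepB d) (result0, PySem.Set.ofList d.keys, PySem.Dict.empty)
  (st.1.items, st.2.2.items.map (fun p => (p.1, p.2.1.items, p.2.2.items)))

-- ===== PRECONDITION & SPEC =====
def Spec_compute_ellc_bulk (trace_cache : List (String × List Int)) (out : (List (String × Option Int)) × (List (Int × (List (String × List Int)) × (List (List Int × Int))))) : Prop := out = compute_ellc_bulk_alt trace_cache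
instance (trace_cache : List (String × List Int)) (out : (List (String × Option Int)) × (List (Int × (List (String × List Int)) × (List (List Int × Int))))) : Decidable (Spec_compute_ellc_bulk trace_cache out) := by
  unfold Spec_compute_ellc_bulk
  have e1 : DecidableEq (List (String × List Int)) := inferInstance
  have e2 : DecidableEq (List (List Int × Int)) := inferInstance
  have e3 : DecidableEq (Int × (List (String × List Int)) × (List (List Int × Int))) :=
    @instDecidableEqProd _ _ inferInstance (@instDecidableEqProd _ _ e1 e2)
  have h1 : DecidableEq (List (String × Option Int)) := inferInstance
  have h2 : DecidableEq (List (Int × (List (String × List Int)) × (List (List Int × Int)))) :=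
    @instDecidableEqList _ e3
  exact @instDecidableEqProd _ _ h1 h2 out (compute_ellc_bulk_alt trace_cache)

-- ===== CLAIM (what is proved, stated in full; the proofs are below) =====
def Claim_equal_compute_ellc_bulk : Prop := ∀ (trace_cache : List (String × List Int)), Dom_compute_ellc_bulk trace_cache → Spec_compute_ellc_bulk trace_cache (compute_ellc_bulk trace_cache)

-- ===== LEMMAS AND PROOFS =====

-- the specification value: the first ell in es whose fingerprint of label is unique
def pvUniq (d : PySem.Dict String (List Int)) (ell : Int) (label : String) : Bool :=
  decide ((PySem.Dict.counter (pvFingerA d ell).values).getD ((pvFingerA d ell).getD label []) 0 = 1)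

def pvFu (d : PySem.Dict String (List Int)) (es : List Int) (label : String) : Option Int :=
  es.find? (fun ell => pvUniq d ell label)

lemma pvFingerB_eq : pvFingerB = pvFingerA := rfl

lemma pvFpsbeA_items (d : PySem.Dict String (List Int)) :
    (pvFpsbeA d).items = pvELLS.map
      (fun ell => (ell, (pvFingerA d ell, PySem.Dict.counter (pvFingerA d ell).values))) := by
  have h := PySem.Dict.items_foldl_insert_fresh (l := pvELLS) (k := fun ell => ell)
    (v := fun ell => (pvFingerA d ell, PySem.Dict.counter (pvFingerA d ell).values))
    (d := PySem.Dict.empty) (by intro a _; simp) (by decide)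
  refine Eq.trans ?_ (List.nil_append _)
  exact h

lemma pvFpsbeA_keys (d : PySem.Dict String (List Int)) : (pvFpsbeA d).keys = pvELLS := by
  simp only [PySem.Dict.keys, pvFpsbeA_items, List.map_map]
  exact (List.map_congr_left (fun ell _ => rfl)).trans (List.map_id _)

lemma pvFpsbeA_getD (d : PySem.Dict String (List Int)) {ell : Int} (h : ell ∈ pvELLS) :
    (pvFpsbeA d).getD ell (PySem.Dict.empty, PySem.Dict.empty)
      = (pvFingerA d ell, PySem.Dict.counter (pvFingerA d ell).values) := by
  apply PySem.Dict.getD_of_mem_items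
  · rw [pvFpsbeA_items]; exact List.mem_map.2 ⟨ell, h, rfl⟩
  · rw [pvFpsbeA_keys]; decide

lemma pvEllcA_eq (d : PySem.Dict String (List Int)) (label : String) :
    ∀ es : List Int, (∀ ell ∈ es, ell ∈ pvELLS) →
      pvEllcA (pvFpsbeA d) label es = pvFu d es label := by
  intro es
  induction es with
  | nil => intro _; rfl
  | cons ell rest ih =>
    intro h
    have hm : ell ∈ pvELLS := h ell (List.mem_cons_self ..)
    simp only [pvEllcA, pvFpsbeA_getD d hm]
    by_cases hu : (PySem.Dict.counter (pvFingerA d ell).values).getD ((pvFingerA d ell).getD label []) 0 = 1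
    · rw [if_pos hu]
      have hq : pvUniq d ell label = true := by unfold pvUniq; exact decide_eq_true hu
      unfold pvFu
      rw [List.find?_cons_of_pos (p := fun e => pvUniq d e label) hq]
    · rw [if_neg hu, ih (fun e he => h e (List.mem_cons_of_mem _ he))]
      have hq : ¬ pvUniq d ell label = true := by
        unfold pvUniq; simpa using hu
      unfold pvFu
      rw [List.find?_cons_of_neg (p := fun e => pvUniq d e label) hq]

lemma A_result (trace_cache : List (String × List Int)) :
    compute_ellc_bulk trace_cache =
      ((PySem.Dict.ofList trace_cache).keys.map
         (fun l => (l, pvFu (PySem.Dict.ofList trace_cache) pvELLS l)),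
       pvELLS.map (fun ell =>
         (ell, (pvFingerA (PySem.Dict.ofList trace_cache) ell).items,
               (PySem.Dict.counter (pvFingerA (PySem.Dict.ofList trace_cache) ell).values).items))) := by
  set d := PySem.Dict.ofList trace_cache with hd
  have hnd : d.keys.Nodup := PySem.Dict.nodup_keys_ofList trace_cache
  have hres := PySem.Dict.items_foldl_insert_fresh (l := d.keys) (k := fun l => l)
    (v := fun label => pvEllcA (pvFpsbeA d) label pvELLS)
    (d := PySem.Dict.empty) (by intro a _; simp) (by simpa using hnd)
  simp only [compute_ellc_bulk, ← hd]
  have h1 : (d.keys.foldl (fun res label => res.insert label (pvEllcA (pvFpsbeA d) label pvELLS))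
      PySem.Dict.empty).items = d.keys.map (fun l => (l, pvFu d pvELLS l)) := by
    refine hres.trans ?_
    refine (List.nil_append _).trans ?_
    refine List.map_congr_left (fun l _ => ?_)
    show (l, pvEllcA (pvFpsbeA d) l pvELLS) = (l, pvFu d pvELLS l)
    rw [pvEllcA_eq d l pvELLS (fun _ h => h)]
  have h2 : (pvFpsbeA d).items.map (fun p => (p.1, p.2.1.items, p.2.2.items))
      = pvELLS.map (fun ell =>
        (ell, (pvFingerA d ell).items, (PySem.Dict.counter (pvFingerA d ell).values).items)) := by
    rw [pvFpsbeA_items, List.map_map]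
    exact List.map_congr_left (fun ell _ => rfl)
  exact Prod.ext h1 h2

-- B-side: the inner 'for label in list(unresolved)' loop, characterised
lemma innerB (d : PySem.Dict String (List Int)) (ell : Int) :
    ∀ (ys : List String) (res : PySem.Dict String (Option Int)) (s : List String),
      (∀ y ∈ ys, res.contains y = true) →
      ys.foldl (fun pr label =>
          if (PySem.Dict.counter (pvFingerB d ell).values).getD ((pvFingerB d ell).getD label []) 0 = 1
          then (pr.1.insert label (some ell), PySem.Set.discard pr.2 label)
          else pr) (res, s)
      = (PySem.Dict.mk (res.items.map (fun kv =>
            if kv.1 ∈ ys ∧ pvUniq d ell kv.1 = true then (kv.1, (some ell : Option Int)) else kv)),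
         s.filter (fun y => !(decide (y ∈ ys) && pvUniq d ell y))) := by
  intro ys
  induction ys with
  | nil =>
    intro res s _
    simp only [List.foldl_nil]
    refine Prod.ext (PySem.Dict.ext ?_) ?_
    · show res.items = List.map _ res.items
      symm
      refine (List.map_congr_left (fun kv _ => ?_)).trans (List.map_id _)
      exact if_neg (by simp)
    · show s = List.filter _ s
      symm
      refine (List.filter_congr (fun a _ => ?_)).trans (List.filter_true _)
      simp
  | cons y ys ih =>
    intro res s hcont
    rw [List.foldl_cons]
    by_cases hq : (PySem.Dict.counter (pvFingerB d ell).values).getD ((pvFingerB d ell).getD y []) 0 = 1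
    · have hq' : pvUniq d ell y = true := by
        rw [pvFingerB_eq] at hq; unfold pvUniq; exact decide_eq_true hq
      rw [if_pos hq]
      rw [ih (res.insert y (some ell)) (PySem.Set.discard s y) (by
        intro z hz
        rw [PySem.Dict.contains_insert]
        rcases eq_or_ne z y with h | h
        · simp [h]
        · simp [hcont z (List.mem_cons_of_mem _ hz)])]
      refine Prod.ext (PySem.Dict.ext ?_) ?_
      · show (res.insert y (some ell)).items.map _ = res.items.map _
        rw [PySem.Dict.items_insert_of_contains res (some ell) (hcont y (List.mem_cons_self ..)),
          List.map_map]
        refine List.map_congr_left (fun kv _ => ?_)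
        simp only [Function.comp_apply]
        rcases eq_or_ne kv.1 y with h | h
        · rw [if_pos (show (kv.1 == y) = true from by simp [h])]
          rw [if_pos (show kv.1 ∈ y :: ys ∧ pvUniq d ell kv.1 = true from
            ⟨by rw [h]; exact List.mem_cons_self .., by rw [h]; exact hq'⟩)]
          split <;> simp [h]
        · rw [if_neg (show ¬ (kv.1 == y) = true from by simp [h])]
          by_cases hmem : kv.1 ∈ ys ∧ pvUniq d ell kv.1 = true
          · rw [if_pos hmem, if_pos ⟨List.mem_cons_of_mem _ hmem.1, hmem.2⟩]
          · have hmem' : ¬(kv.1 ∈ y :: ys ∧ pvUniq d ell kv.1 = true) :=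
              fun hc => hmem ⟨(List.mem_cons.1 hc.1).resolve_left h, hc.2⟩
            rw [if_neg hmem, if_neg hmem']
      · show List.filter _ (PySem.Set.discard s y) = List.filter _ s
        simp only [PySem.Set.discard, List.filter_filter]
        refine List.filter_congr (fun a _ => ?_)
        rcases eq_or_ne a y with h | h
        · simp [h, hq']
        · simp [h, List.mem_cons]
    · have hq' : pvUniq d ell y = false := by
        rw [pvFingerB_eq] at hq; unfold pvUniq; exact decide_eq_false hq
      rw [if_neg hq]
      rw [ih res s (fun z hz => hcont z (List.mem_cons_of_mem _ hz))]
      refine Prod.ext (PySem.Dict.ext ?_) ?_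
      · show res.items.map _ = res.items.map _
        refine List.map_congr_left (fun kv _ => ?_)
        rcases eq_or_ne kv.1 y with h | h
        · have c1 : ¬(kv.1 ∈ ys ∧ pvUniq d ell kv.1 = true) := by
            rintro ⟨_, hu⟩; rw [h, hq'] at hu; exact Bool.false_ne_true hu
          have c2 : ¬(kv.1 ∈ y :: ys ∧ pvUniq d ell kv.1 = true) := by
            rintro ⟨_, hu⟩; rw [h, hq'] at hu; exact Bool.false_ne_true hu
          rw [if_neg c1, if_neg c2]
        · by_cases hmem : kv.1 ∈ ys ∧ pvUniq d ell kv.1 = true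
          · rw [if_pos hmem, if_pos ⟨List.mem_cons_of_mem _ hmem.1, hmem.2⟩]
          · have hmem' : ¬(kv.1 ∈ y :: ys ∧ pvUniq d ell kv.1 = true) :=
              fun hc => hmem ⟨(List.mem_cons.1 hc.1).resolve_left h, hc.2⟩
            rw [if_neg hmem, if_neg hmem']
      · refine List.filter_congr (fun a _ => ?_)
        rcases eq_or_ne a y with h | h
        · simp [h, hq']
        · simp [h, List.mem_cons]

lemma pvFu_append_one (d : PySem.Dict String (List Int)) (done : List Int) (ell : Int) (l : String) :
    pvFu d (done ++ [ell]) l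
      = (pvFu d done l).or (if pvUniq d ell l = true then some ell else none) := by
  unfold pvFu
  rw [List.find?_append]
  congr 1
  by_cases hu : pvUniq d ell l = true
  · rw [List.find?_cons_of_pos (p := fun e => pvUniq d e l) hu, if_pos hu]
  · rw [List.find?_cons_of_neg (p := fun e => pvUniq d e l) hu, if_neg hu]
    rfl

lemma stepB (d : PySem.Dict String (List Int)) (done : List Int) (ell : Int)
    (acc : PySem.Dict Int ((PySem.Dict String (List Int)) × (PySem.Dict (List Int) Int))) :
    pvStepB d
      (PySem.Dict.mk (d.keys.map (fun l => (l, pvFu d done l))),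
       d.keys.filter (fun l => (pvFu d done l).isNone), acc) ell
    = (PySem.Dict.mk (d.keys.map (fun l => (l, pvFu d (done ++ [ell]) l))),
       d.keys.filter (fun l => (pvFu d (done ++ [ell]) l).isNone),
       acc.insert ell (pvFingerB d ell, PySem.Dict.counter (pvFingerB d ell).values)) := by
  have hkeys : (PySem.Dict.mk (d.keys.map (fun l => (l, pvFu d done l)))).keys = d.keys := by
    simp only [PySem.Dict.keys, List.map_map]
    exact List.map_congr_left (fun p _ => rfl)
  simp only [pvStepB]
  rw [innerB d ell (d.keys.filter (fun l => (pvFu d done l).isNone))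
    (PySem.Dict.mk (d.keys.map (fun l => (l, pvFu d done l))))
    (d.keys.filter (fun l => (pvFu d done l).isNone)) (by
      intro y hy
      rw [PySem.Dict.contains_eq_decide_mem_keys, hkeys]
      exact decide_eq_true (List.mem_of_mem_filter hy))]
  refine Prod.ext (PySem.Dict.ext ?_) (Prod.ext ?_ rfl)
  · show (d.keys.map (fun l => (l, pvFu d done l))).map _ = d.keys.map _
    rw [List.map_map]
    refine List.map_congr_left (fun l hl => ?_)
    simp only [Function.comp_apply]
    cases h : pvFu d done l with
    | none =>
      have hin : l ∈ d.keys.filter (fun l => (pvFu d done l).isNone) :=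
        List.mem_filter.2 ⟨hl, by rw [h]; rfl⟩
      by_cases hu : pvUniq d ell l = true
      · rw [if_pos ⟨hin, hu⟩, pvFu_append_one, h, if_pos hu]
        rfl
      · rw [if_neg (fun hc => hu hc.2), pvFu_append_one, h, if_neg hu]
        rfl
    | some v =>
      have hnotin : l ∉ d.keys.filter (fun l => (pvFu d done l).isNone) := by
        intro hin
        have := (List.mem_filter.1 hin).2
        rw [h] at this
        simp at this
      rw [if_neg (fun hc => hnotin hc.1), pvFu_append_one, h]
      rfl
  · show List.filter _ (List.filter _ _) = _
    rw [List.filter_filter]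
    refine List.filter_congr (fun l hl => ?_)
    cases h : pvFu d done l with
    | none =>
      by_cases hu : pvUniq d ell l = true
      · simp [pvFu_append_one, hu, h, Option.or, List.mem_filter, hl]
      · have hu' : pvUniq d ell l = false := by revert hu; cases pvUniq d ell l <;> simp
        simp [pvFu_append_one, hu', h, Option.or, List.mem_filter, hl]
    | some v =>
      simp [pvFu_append_one, h, Option.or, List.mem_filter, hl]

lemma outerB (d : PySem.Dict String (List Int)) :
    ∀ (es done : List Int)
      (acc : PySem.Dict Int ((PySem.Dict String (List Int)) × (PySem.Dict (List Int) Int))),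
      es.foldl (pvStepB d)
        (PySem.Dict.mk (d.keys.map (fun l => (l, pvFu d done l))),
         d.keys.filter (fun l => (pvFu d done l).isNone), acc)
      = (PySem.Dict.mk (d.keys.map (fun l => (l, pvFu d (done ++ es) l))),
         d.keys.filter (fun l => (pvFu d (done ++ es) l).isNone),
         es.foldl (fun a ell => a.insert ell (pvFingerB d ell, PySem.Dict.counter (pvFingerB d ell).values)) acc) := by
  intro es
  induction es with
  | nil => intro done acc; simp
  | cons ell rest ih =>
    intro done acc
    rw [List.foldl_cons, stepB d done ell acc, ih (done ++ [ell])]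
    simp

lemma B_result (trace_cache : List (String × List Int)) :
    compute_ellc_bulk_alt trace_cache =
      ((PySem.Dict.ofList trace_cache).keys.map
         (fun l => (l, pvFu (PySem.Dict.ofList trace_cache) pvELLS l)),
       pvELLS.map (fun ell =>
         (ell, (pvFingerA (PySem.Dict.ofList trace_cache) ell).items,
               (PySem.Dict.counter (pvFingerA (PySem.Dict.ofList trace_cache) ell).values).items))) := by
  set d := PySem.Dict.ofList trace_cache with hd
  have hnd : d.keys.Nodup := PySem.Dict.nodup_keys_ofList trace_cache
  have hres0 := PySem.Dict.items_foldl_insert_fresh (l := d.keys) (k := fun l => l)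
    (v := fun _ => (none : Option Int))
    (d := PySem.Dict.empty) (by intro a _; simp) (by simpa using hnd)
  have h0 : d.keys.foldl (fun r l => r.insert l (none : Option Int)) PySem.Dict.empty
      = PySem.Dict.mk (d.keys.map (fun l => (l, pvFu d [] l))) := by
    refine PySem.Dict.ext ?_
    refine hres0.trans ?_
    refine (List.nil_append _).trans ?_
    rfl
  have hset : PySem.Set.ofList d.keys = d.keys.filter (fun l => (pvFu d [] l).isNone) := by
    rw [PySem.Set.ofList_eq_self_of_nodup _ hnd]
    exact ((List.filter_congr (fun l _ => rfl)).trans (List.filter_true _)).symm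
  simp only [compute_ellc_bulk_alt, ← hd, h0, hset]
  rw [outerB d pvELLS [] PySem.Dict.empty]
  refine Prod.ext rfl ?_
  have hacc : pvELLS.foldl
      (fun a ell => a.insert ell (pvFingerB d ell, PySem.Dict.counter (pvFingerB d ell).values))
      PySem.Dict.empty = pvFpsbeA d := rfl
  show (pvELLS.foldl _ PySem.Dict.empty).items.map _ = _
  rw [hacc, pvFpsbeA_items, List.map_map]
  exact List.map_congr_left (fun ell _ => rfl)

-- ===== VERDICT (by name: the statement is the Claim_ definition above) =====
theorem compute_ellc_bulk_spec : Claim_equal_compute_ellc_bulk := by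
  intro trace_cache _
  show compute_ellc_bulk trace_cache = compute_ellc_bulk_alt trace_cache
  rw [A_result, B_result]
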